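-- pv_equiv track=rewrite | github.com/kganjam/arc-agi-2-solver | patterns/feature_detector.py | _check_alternating_rows
-- ===== SOURCE A (Python) =====
-- from typing import List, Dict, Tuple, Any, Optional
--
-- def _check_alternating_rows(rows: List[Tuple]) -> bool:
--     """Check if rows alternate between two patterns"""
--     if len(rows) < 2:
--         return False
--
--     pattern1, pattern2 = rows[0], rows[1]
--     if pattern1 == pattern2:
--         return False
--
--     for i, row in enumerate(rows):
--         expected = pattern1 if i % 2 == 0 else pattern2
--         if row != expected:
--             return False
--
--     return True
-- ===== SOURCE B (Python) =====
-- def _check_alternating_rows(rows):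
--     """Check if rows alternate between two patterns"""
--     if len(rows) < 2:
--         return False
--     pattern1, pattern2 = rows[0], rows[1]
--     if pattern1 == pattern2:
--         return False
--
--     rs = rows
--     while rs:
--         if rs[0] != pattern1:
--             return False
--         if len(rs) > 1 and rs[1] != pattern2:
--             return False
--         rs = rs[2:]
--     return True
-- ===== Notes on version B (the rewrite author's own statement) =====
-- stated objective: alternative
-- what changed: Replaces the indexed enumerate loop with parity tests by a loop that consumes the rows two at a time, checking a (pattern1, pattern2) pair per step, so no index or modulus arithmetic is maintained.
import Mathlib
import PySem

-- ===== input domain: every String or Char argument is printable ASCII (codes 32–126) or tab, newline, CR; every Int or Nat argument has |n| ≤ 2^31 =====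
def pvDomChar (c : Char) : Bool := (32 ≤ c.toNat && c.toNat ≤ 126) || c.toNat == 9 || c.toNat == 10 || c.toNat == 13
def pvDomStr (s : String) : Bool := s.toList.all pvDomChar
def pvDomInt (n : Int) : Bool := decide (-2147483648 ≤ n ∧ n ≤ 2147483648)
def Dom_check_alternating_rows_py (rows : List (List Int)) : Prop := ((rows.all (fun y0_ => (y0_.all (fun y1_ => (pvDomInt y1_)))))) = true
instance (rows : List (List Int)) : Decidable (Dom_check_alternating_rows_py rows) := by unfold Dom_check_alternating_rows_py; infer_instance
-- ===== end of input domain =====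

-- B replaces the indexed parity loop by a loop consuming two rows (one pattern pair) per step (alternative decomposition, same cost).
-- ===== PORT A =====
-- for i, row in enumerate(rows): expected = pattern1 if i % 2 == 0 else pattern2; if row != expected: return False
def loopA (p1 p2 : List Int) : List (List Int) → Nat → Bool
  | [], _ => true
  | r :: rs, i => if r != (if i % 2 = 0 then p1 else p2) then false else loopA p1 p2 rs (i + 1)

def check_alternating_rows_py (rows : List (List Int)) : Bool :=
  if rows.length < 2 then false
  else
    match rows with
    | r0 :: r1 :: _ => if r0 == r1 then false else loopA r0 r1 rows 0
    | _ => false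

-- ===== PORT B =====
-- while rs: check rs[0], rs[1] against the pair, then rs = rs[2:]
def okB (p1 p2 : List Int) : List (List Int) → Bool
  | [] => true
  | [r] => if r != p1 then false else true
  | r :: s :: rs => if r != p1 then false else if s != p2 then false else okB p1 p2 rs

def check_alternating_rows_py_alt (rows : List (List Int)) : Bool :=
  if rows.length < 2 then false
  else
    match rows with
    | [] => false
    | [_] => false
    | r0 :: r1 :: _ => if r0 == r1 then false else okB r0 r1 rows

-- ===== PRECONDITION & SPEC =====
def Spec_check_alternating_rows_py (rows : List (List Int)) (out : Bool) : Prop := out = check_alternating_rows_py_alt rows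
instance (rows : List (List Int)) (out : Bool) : Decidable (Spec_check_alternating_rows_py rows out) := by unfold Spec_check_alternating_rows_py; infer_instance

-- ===== CLAIM (what is proved, stated in full; the proofs are below) =====
def Claim_equal_check_alternating_rows_py : Prop := ∀ (rows : List (List Int)), Dom_check_alternating_rows_py rows → Spec_check_alternating_rows_py rows (check_alternating_rows_py rows)

-- ===== LEMMAS AND PROOFS =====

-- ===== VERDICT (by name: the statement is the Claim_ definition above) =====
lemma loopA_even (p1 p2 : List Int) :
    ∀ (n : Nat) (rs : List (List Int)) (i : Nat), rs.length ≤ n → i % 2 = 0 →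
      loopA p1 p2 rs i = okB p1 p2 rs := by
  intro n
  induction n with
  | zero =>
    intro rs i h _
    cases rs with
    | nil => rfl
    | cons r rs => simp at h
  | succ n ih =>
    intro rs i hlen hi
    match rs with
    | [] => rfl
    | [r] =>
      simp only [loopA, okB]
      rw [if_pos hi]
    | r :: s :: rs' =>
      have h1 : ¬ (i + 1) % 2 = 0 := by omega
      simp only [loopA, okB]
      rw [if_pos hi, if_neg h1]
      have hr : rs'.length ≤ n := by simp at hlen; omega
      rw [ih rs' (i + 1 + 1) hr (by omega)]

theorem check_alternating_rows_py_spec : Claim_equal_check_alternating_rows_py := by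
  intro rows _
  unfold Spec_check_alternating_rows_py check_alternating_rows_py check_alternating_rows_py_alt
  split
  · rfl
  · match rows with
    | [] => rfl
    | [r] => rfl
    | r0 :: r1 :: rest =>
      simp only
      split
      · rfl
      · exact loopA_even r0 r1 (r0 :: r1 :: rest).length _ 0 (le_refl _) rfl
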